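-- pv_equiv track=rewrite | github.com/lkj000/aura-x-platform | python/euclidean_rhythms.py | visualize_pattern_ascii
-- ===== SOURCE A (Python) =====
-- from typing import List, Tuple, Dict
--
-- def visualize_pattern_ascii(pattern: List[int], label: str = "") -> str:
--     """
--     Create ASCII visualization of rhythm pattern.
--
--     Args:
--         pattern: Binary rhythm pattern
--         label: Optional label for the pattern
--
--     Returns:
--         ASCII art string
--     """
--     visual = []
--     if label:
--         visual.append(f"\n{label}")
--         visual.append("=" * len(label))
--
--     # Pattern visualization
--     visual.append("".join(["█" if hit else "·" for hit in pattern]))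
--
--     # Beat markers
--     visual.append("".join([str(i % 10) for i in range(len(pattern))]))
--
--     # Bar markers (every 4 steps)
--     bar_markers = "".join(["|" if i % 4 == 0 else " " for i in range(len(pattern))])
--     visual.append(bar_markers)
--
--     return "\n".join(visual)
-- ===== SOURCE B (Python) =====
-- def visualize_pattern_ascii(pattern, label=""):
--     """Column-major construction: one (hit, beat, bar) tuple per step, transposed into rows."""
--     columns = [
--         ("\u2588" if hit else "\u00b7", str(i % 10), "|" if i % 4 == 0 else " ")
--         for i, hit in enumerate(pattern)
--     ]
--     rows = ["".join(r) for r in zip(*columns)] if columns else ["", "", ""]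
--     header = ["\n" + label, "=" * len(label)] if label else []
--     return "\n".join(header + rows)
-- ===== Notes on version B (the rewrite author's own statement) =====
-- stated objective: alternative
-- what changed: B builds the picture column-major: one (hit-char, beat-digit, bar-marker) tuple per step, then transposes with zip(*) and joins each resulting row, instead of A's three separate row-comprehension passes over the pattern.
import Mathlib
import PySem

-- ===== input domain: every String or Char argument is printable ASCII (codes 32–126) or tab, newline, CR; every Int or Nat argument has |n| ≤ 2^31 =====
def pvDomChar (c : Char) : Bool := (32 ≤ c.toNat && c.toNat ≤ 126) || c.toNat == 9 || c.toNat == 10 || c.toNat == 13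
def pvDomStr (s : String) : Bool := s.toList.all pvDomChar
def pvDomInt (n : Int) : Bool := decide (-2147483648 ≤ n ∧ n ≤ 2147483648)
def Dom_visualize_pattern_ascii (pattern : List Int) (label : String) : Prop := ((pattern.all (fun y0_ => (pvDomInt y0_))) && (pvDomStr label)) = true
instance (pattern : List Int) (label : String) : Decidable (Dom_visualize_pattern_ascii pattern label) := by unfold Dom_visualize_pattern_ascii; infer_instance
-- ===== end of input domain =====

-- B builds the picture column-major (one (hit,beat,bar) triple per step, then transposes) where A
-- makes three separate row passes; objective: alternative decomposition, same cost, return value only.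

-- ===== PORT A =====
-- A: three independent row comprehensions over the pattern / its index range, appended to `visual`.
def visualize_pattern_ascii (pattern : List Int) (label : String) : String :=
  let visual : List (List Char) :=
    if label.toList ≠ [] then
      ['\n' :: label.toList, PySem.List.pyRepeat ['='] (PySem.Chars.len label.toList)]
    else []
  let hits : List Char :=
    PySem.Chars.join [] (pattern.map (fun hit => if hit ≠ 0 then ['█'] else ['·']))
  let beats : List Char :=
    PySem.Chars.join []
      ((PySem.List.pyRange 0 (pattern.length : Int) 1).map
        (fun i => PySem.Int.toChars (PySem.Int.mod i 10)))
  let bar_markers : List Char :=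
    PySem.Chars.join []
      ((PySem.List.pyRange 0 (pattern.length : Int) 1).map
        (fun i => if PySem.Int.mod i 4 = 0 then ['|'] else [' ']))
  String.ofList (PySem.Chars.join ['\n'] (visual ++ [hits, beats, bar_markers]))

-- ===== PORT B =====
-- zip(*columns) on a list of 3-tuples is the triple unzip:
def pvUnzip3 {α β γ : Type} : List (α × β × γ) → List α × List β × List γ
  | [] => ([], [], [])
  | (a, b, c) :: t =>
    let r := pvUnzip3 t
    (a :: r.1, b :: r.2.1, c :: r.2.2)

def visualize_pattern_ascii_alt (pattern : List Int) (label : String) : String :=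
  let columns : List (List Char × List Char × List Char) :=
    (PySem.List.enumerate pattern 0).map (fun p =>
      ((if p.2 ≠ 0 then ['█'] else ['·']),
       PySem.Int.toChars (PySem.Int.mod p.1 10),
       (if PySem.Int.mod p.1 4 = 0 then ['|'] else [' '])))
  let rows : List (List Char) :=
    if columns ≠ [] then
      let u := pvUnzip3 columns
      [PySem.Chars.join [] u.1, PySem.Chars.join [] u.2.1, PySem.Chars.join [] u.2.2]
    else [[], [], []]
  let header : List (List Char) :=
    if label.toList ≠ [] then
      ['\n' :: label.toList, PySem.List.pyRepeat ['='] (PySem.Chars.len label.toList)]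
    else []
  String.ofList (PySem.Chars.join ['\n'] (header ++ rows))

-- ===== PRECONDITION & SPEC =====
def Spec_visualize_pattern_ascii (pattern : List Int) (label : String) (out : String) : Prop := out = visualize_pattern_ascii_alt pattern label
instance (pattern : List Int) (label : String) (out : String) : Decidable (Spec_visualize_pattern_ascii pattern label out) := by unfold Spec_visualize_pattern_ascii; infer_instance

-- ===== CLAIM =====
def Claim_equal_visualize_pattern_ascii : Prop := ∀ (pattern : List Int) (label : String), Dom_visualize_pattern_ascii pattern label → Spec_visualize_pattern_ascii pattern label (visualize_pattern_ascii pattern label)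

-- ===== LEMMAS AND PROOFS =====
lemma pvUnzip3_map {α β γ δ : Type} (l : List α) (f : α → β) (g : α → γ) (h : α → δ) :
    pvUnzip3 (l.map (fun x => (f x, g x, h x))) = (l.map f, l.map g, l.map h) := by
  induction l with
  | nil => rfl
  | cons a t ih => simp [pvUnzip3, ih]

lemma enum_map_snd {α β : Type} (xs : List α) (F : α → β) :
    (PySem.List.enumerate xs 0).map (fun p => F p.2) = xs.map F := by
  conv_rhs => rw [← PySem.List.map_snd_enumerate xs 0]
  rw [List.map_map]; rfl

lemma enum_map_fst {α β : Type} (xs : List α) (F : Int → β) :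
    (PySem.List.enumerate xs 0).map (fun p => F p.1)
      = (PySem.List.pyRange 0 (xs.length : Int) 1).map F := by
  have h1 : List.map (fun x => x.1) (PySem.List.enumerate xs 0)
      = PySem.List.pyRange 0 (xs.length : Int) 1 := by
    rw [PySem.List.map_fst_enumerate]; norm_num
  conv_rhs => rw [← h1]
  rw [List.map_map]; rfl

-- ===== VERDICT =====
theorem visualize_pattern_ascii_spec : Claim_equal_visualize_pattern_ascii := by
  intro pattern label _
  show visualize_pattern_ascii pattern label = visualize_pattern_ascii_alt pattern label
  unfold visualize_pattern_ascii visualize_pattern_ascii_alt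
  cases pattern with
  | nil => simp [PySem.List.enumerate]
  | cons a t =>
    simp only [ne_eq]
    rw [pvUnzip3_map]
    dsimp only
    rw [enum_map_snd (a :: t) (fun hit : Int => if ¬hit = 0 then ['█'] else ['·']),
        enum_map_fst (a :: t) (fun i : Int => PySem.Int.toChars (PySem.Int.mod i 10)),
        enum_map_fst (a :: t) (fun i : Int => if PySem.Int.mod i 4 = 0 then ['|'] else [' '])]
    split_ifs <;>
      first
        | rfl
        | (exfalso; simp_all [PySem.List.enumerate_cons])
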